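-- pv_equiv track=rewrite | github.com/Abhishek-Pathak-90/Lattice_Visualization | lattice_visualizer.py | generate_symmetric_offsets
-- ===== SOURCE A (Python) =====
-- def generate_symmetric_offsets(n, step):
--     """
--     Generate a list of y-offsets, symmetric about y=0, spaced by 'step'.
--     """
--     offsets = []
--     if n % 2 == 1:
--         offsets.append(0)
--         for i in range(1, (n // 2) + 1):
--             offsets.append(i * step)
--             offsets.append(-i * step)
--     else:
--         for i in range(1, (n // 2) + 1):
--             offsets.append(i * step)
--             offsets.append(-i * step)
--     return offsets[:n]
-- ===== SOURCE B (Python) =====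
-- def generate_symmetric_offsets(n, step):
--     """
--     Generate a list of y-offsets, symmetric about y=0, spaced by 'step'.
--     Closed-form per output index: magnitude and sign from the index parity.
--     """
--     if n % 2 == 1:
--         return [((k + 1) // 2) * step if k % 2 == 1 else -(k // 2) * step
--                 for k in range(n)]
--     return [(k // 2 + 1) * step if k % 2 == 0 else -(k // 2 + 1) * step
--             for k in range(n)]
-- ===== Notes on version B (the rewrite author's own statement) =====
-- stated objective: idiomatic
-- what changed: Replaces the magnitude-pair append loop plus final slice with a single comprehension over the n output indices, computing each offset directly from its index by a parity/magnitude formula, so no truncation is needed.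
import Mathlib
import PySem

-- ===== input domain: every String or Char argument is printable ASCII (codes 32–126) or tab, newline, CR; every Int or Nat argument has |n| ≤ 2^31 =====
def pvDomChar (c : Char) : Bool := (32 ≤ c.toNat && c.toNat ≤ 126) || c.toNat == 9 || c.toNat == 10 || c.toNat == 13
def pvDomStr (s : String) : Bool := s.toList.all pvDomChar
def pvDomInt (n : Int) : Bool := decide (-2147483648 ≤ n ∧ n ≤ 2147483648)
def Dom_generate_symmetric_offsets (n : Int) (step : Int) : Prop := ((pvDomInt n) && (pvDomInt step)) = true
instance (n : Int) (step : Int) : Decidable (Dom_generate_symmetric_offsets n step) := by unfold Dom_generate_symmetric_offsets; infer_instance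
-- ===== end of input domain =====

-- B replaces the magnitude-pair loop + slice by one index comprehension with a parity formula (idiomatic, same cost).

-- ===== PORT A =====
def generate_symmetric_offsets (n : Int) (step : Int) : List Int :=
  let offsets : List Int :=
    if PySem.Int.mod n 2 = 1 then
      (PySem.List.pyRange 1 (PySem.Int.floordiv n 2 + 1) 1).foldl
        (fun acc i => (acc ++ [i * step]) ++ [-i * step]) ([] ++ [0])
    else
      (PySem.List.pyRange 1 (PySem.Int.floordiv n 2 + 1) 1).foldl
        (fun acc i => (acc ++ [i * step]) ++ [-i * step]) []
  PySem.List.slice offsets none (some n)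

-- ===== PORT B =====
def generate_symmetric_offsets_alt (n : Int) (step : Int) : List Int :=
  if PySem.Int.mod n 2 = 1 then
    (PySem.List.pyRange 0 n 1).map (fun k =>
      if PySem.Int.mod k 2 = 1 then PySem.Int.floordiv (k + 1) 2 * step
      else -(PySem.Int.floordiv k 2) * step)
  else
    (PySem.List.pyRange 0 n 1).map (fun k =>
      if PySem.Int.mod k 2 = 0 then (PySem.Int.floordiv k 2 + 1) * step
      else -(PySem.Int.floordiv k 2 + 1) * step)

-- ===== PRECONDITION & SPEC =====
def Spec_generate_symmetric_offsets (n : Int) (step : Int) (out : List Int) : Prop := out = generate_symmetric_offsets_alt n step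
instance (n : Int) (step : Int) (out : List Int) : Decidable (Spec_generate_symmetric_offsets n step out) := by unfold Spec_generate_symmetric_offsets; infer_instance

-- ===== CLAIM (what is proved, stated in full; the proofs are below) =====
def Claim_equal_generate_symmetric_offsets : Prop := ∀ (n : Int) (step : Int), Dom_generate_symmetric_offsets n step → Spec_generate_symmetric_offsets n step (generate_symmetric_offsets n step)

-- ===== LEMMAS AND PROOFS =====

lemma slice_to_nonneg (L : List Int) (n : Int) (h : 0 ≤ n) :
    PySem.List.slice L none (some n) = L.take n.toNat := by
  rw [show n = ((n.toNat : Nat) : Int) by omega, PySem.List.slice_to_natCast]; simp; omega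

lemma slice_to_neg' (L : List Int) (n : Int) (h : n < 0) (hlen : L.length ≤ (-n).toNat) :
    PySem.List.slice L none (some n) = [] := by
  rw [show n = -(((-n).toNat : Nat) : Int) by omega,
    PySem.List.slice_to_neg_natCast (k := (-n).toNat) L (by omega),
    Nat.sub_eq_zero_of_le hlen, List.take_zero]

lemma key_odd (step : Int) (m : Nat) :
    (PySem.List.pyRange 1 ((m : Int) + 1) 1).foldl
        (fun acc i => (acc ++ [i * step]) ++ [-i * step]) ([] ++ [0]) =
      (PySem.List.pyRange 0 (2 * (m : Int) + 1) 1).map (fun k =>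
        if PySem.Int.mod k 2 = 1 then PySem.Int.floordiv (k + 1) 2 * step
        else -(PySem.Int.floordiv k 2) * step) := by
  induction m with
  | zero =>
      rw [PySem.List.pyRange_one_eq_nil (by norm_num),
        show (2 * ((0 : Nat) : Int) + 1) = 0 + 1 by norm_num,
        PySem.List.pyRange_one_singleton]
      simp
  | succ m ih =>
      have hr1 : PySem.List.pyRange 1 (((m + 1 : Nat) : Int) + 1) 1
          = PySem.List.pyRange 1 ((m : Int) + 1) 1 ++ [(m : Int) + 1] := by
        push_cast
        exact PySem.List.pyRange_one_succ_right (a := 1) (b := (m : Int) + 1) (by omega)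
      have hr2 : PySem.List.pyRange 0 (2 * ((m + 1 : Nat) : Int) + 1) 1
          = PySem.List.pyRange 0 (2 * (m : Int) + 1) 1 ++ [2 * (m : Int) + 1] ++ [2 * (m : Int) + 1 + 1] := by
        push_cast
        rw [show 2 * ((m : Int) + 1) + 1 = (2 * (m : Int) + 1 + 1) + 1 by ring,
          PySem.List.pyRange_one_succ_right (a := 0) (b := 2 * (m : Int) + 1 + 1) (by omega),
          PySem.List.pyRange_one_succ_right (a := 0) (b := 2 * (m : Int) + 1) (by omega)]
      rw [hr1, hr2, List.foldl_append, List.map_append, List.map_append, ih]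
      have m1 : PySem.Int.mod (2 * (m : Int) + 1) 2 = 1 := by
        rw [PySem.Int.mod_eq_emod_of_pos (by norm_num)]; omega
      have m2 : ¬ PySem.Int.mod (2 * (m : Int) + 1 + 1) 2 = 1 := by
        rw [PySem.Int.mod_eq_emod_of_pos (by norm_num)]; omega
      have d1 : PySem.Int.floordiv (2 * (m : Int) + 1 + 1) 2 = (m : Int) + 1 := by
        rw [PySem.Int.floordiv_eq_ediv_of_pos (by norm_num)]; omega
      simp only [List.foldl_cons, List.foldl_nil, List.map_cons, List.map_nil,
        List.append_assoc, List.singleton_append]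
      rw [if_pos m1, if_neg m2, d1]

lemma key_even (step : Int) (m : Nat) :
    (PySem.List.pyRange 1 ((m : Int) + 1) 1).foldl
        (fun acc i => (acc ++ [i * step]) ++ [-i * step]) [] =
      (PySem.List.pyRange 0 (2 * (m : Int)) 1).map (fun k =>
        if PySem.Int.mod k 2 = 0 then (PySem.Int.floordiv k 2 + 1) * step
        else -(PySem.Int.floordiv k 2 + 1) * step) := by
  induction m with
  | zero => simp [PySem.List.pyRange_one_eq_nil]
  | succ m ih =>
      have hr1 : PySem.List.pyRange 1 (((m + 1 : Nat) : Int) + 1) 1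
          = PySem.List.pyRange 1 ((m : Int) + 1) 1 ++ [(m : Int) + 1] := by
        push_cast
        exact PySem.List.pyRange_one_succ_right (a := 1) (b := (m : Int) + 1) (by omega)
      have hr2 : PySem.List.pyRange 0 (2 * ((m + 1 : Nat) : Int)) 1
          = PySem.List.pyRange 0 (2 * (m : Int)) 1 ++ [2 * (m : Int)] ++ [2 * (m : Int) + 1] := by
        push_cast
        rw [show 2 * ((m : Int) + 1) = (2 * (m : Int) + 1) + 1 by ring,
          PySem.List.pyRange_one_succ_right (a := 0) (b := 2 * (m : Int) + 1) (by omega),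
          PySem.List.pyRange_one_succ_right (a := 0) (b := 2 * (m : Int)) (by omega)]
      rw [hr1, hr2, List.foldl_append, List.map_append, List.map_append, ih]
      have m1 : PySem.Int.mod (2 * (m : Int)) 2 = 0 := by
        rw [PySem.Int.mod_eq_emod_of_pos (by norm_num)]; omega
      have m2 : ¬ PySem.Int.mod (2 * (m : Int) + 1) 2 = 0 := by
        rw [PySem.Int.mod_eq_emod_of_pos (by norm_num)]; omega
      have d1 : PySem.Int.floordiv (2 * (m : Int)) 2 = (m : Int) := by
        rw [PySem.Int.floordiv_eq_ediv_of_pos (by norm_num)]; omega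
      have d2 : PySem.Int.floordiv (2 * (m : Int) + 1) 2 = (m : Int) := by
        rw [PySem.Int.floordiv_eq_ediv_of_pos (by norm_num)]; omega
      simp only [List.foldl_cons, List.foldl_nil, List.map_cons, List.map_nil,
        List.append_assoc, List.singleton_append]
      rw [if_pos m1, if_neg m2, d1, d2]

-- ===== VERDICT (by name: the statement is the Claim_ definition above) =====
theorem generate_symmetric_offsets_spec : Claim_equal_generate_symmetric_offsets := by
  intro n step _
  show generate_symmetric_offsets n step = generate_symmetric_offsets_alt n step
  unfold generate_symmetric_offsets generate_symmetric_offsets_alt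
  by_cases hodd : PySem.Int.mod n 2 = 1
  · rw [if_pos hodd, if_pos hodd]
    have hmod : n % 2 = 1 := by rwa [PySem.Int.mod_eq_emod_of_pos (by norm_num)] at hodd
    by_cases hn : 0 ≤ n
    · obtain ⟨m, hm⟩ : ∃ m : Nat, n = 2 * (m : Int) + 1 := ⟨(n / 2).toNat, by omega⟩
      have hd : PySem.Int.floordiv n 2 = (m : Int) := by
        rw [PySem.Int.floordiv_eq_ediv_of_pos (by norm_num)]; omega
      rw [hd, key_odd step m, ← hm, slice_to_nonneg _ _ hn, List.take_of_length_le]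
      simp [PySem.List.length_pyRange_one]
    · have hd : PySem.Int.floordiv n 2 + 1 ≤ 1 := by
        rw [PySem.Int.floordiv_eq_ediv_of_pos (by norm_num)]; omega
      rw [PySem.List.pyRange_one_eq_nil hd, PySem.List.pyRange_one_eq_nil (by omega),
        List.foldl_nil, List.map_nil, slice_to_neg' _ _ (by omega) (by simp; omega)]
  · rw [if_neg hodd, if_neg hodd]
    have hmod : n % 2 = 0 := by
      rw [PySem.Int.mod_eq_emod_of_pos (by norm_num)] at hodd; omega
    by_cases hn : 0 ≤ n
    · obtain ⟨m, hm⟩ : ∃ m : Nat, n = 2 * (m : Int) := ⟨(n / 2).toNat, by omega⟩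
      have hd : PySem.Int.floordiv n 2 = (m : Int) := by
        rw [PySem.Int.floordiv_eq_ediv_of_pos (by norm_num)]; omega
      rw [hd, key_even step m, ← hm, slice_to_nonneg _ _ hn, List.take_of_length_le]
      simp [PySem.List.length_pyRange_one]
    · have hd : PySem.Int.floordiv n 2 + 1 ≤ 1 := by
        rw [PySem.Int.floordiv_eq_ediv_of_pos (by norm_num)]; omega
      rw [PySem.List.pyRange_one_eq_nil hd, PySem.List.pyRange_one_eq_nil (by omega),
        List.foldl_nil, List.map_nil, slice_to_neg' _ _ (by omega) (by simp)]
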